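-- pv_equiv track=rewrite | github.com/JulicaKuz/sde_jku | gameoflife/babysteps/GameOfLife.py | countActiveNeighbours
-- ===== SOURCE A (Python) =====
-- def countActiveNeighbours(field):
--     counter = 0
--     for r_index, row in enumerate(field):
--         for c_index, cell in enumerate(row):
--             if r_index == 1 and c_index == 1:
--                 continue
--             elif cell is True:
--                 counter += 1
--     return counter
-- ===== SOURCE B (Python) =====
-- def countActiveNeighbours(field):
--     rows = list(field)
--     if len(rows) > 1:
--         rows[1] = rows[1][:1] + rows[1][2:]
--     flat = [cell for row in rows for cell in row]
--     return flat.count(True)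
-- ===== Notes on version B (the rewrite author's own statement) =====
-- stated objective: alternative
-- what changed: Instead of skipping the center inside the counting loop, B first deletes the center cell (1,1) from the data by slicing row 1, then flattens and does one unconditional count(True) with no per-cell branching.
import Mathlib
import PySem

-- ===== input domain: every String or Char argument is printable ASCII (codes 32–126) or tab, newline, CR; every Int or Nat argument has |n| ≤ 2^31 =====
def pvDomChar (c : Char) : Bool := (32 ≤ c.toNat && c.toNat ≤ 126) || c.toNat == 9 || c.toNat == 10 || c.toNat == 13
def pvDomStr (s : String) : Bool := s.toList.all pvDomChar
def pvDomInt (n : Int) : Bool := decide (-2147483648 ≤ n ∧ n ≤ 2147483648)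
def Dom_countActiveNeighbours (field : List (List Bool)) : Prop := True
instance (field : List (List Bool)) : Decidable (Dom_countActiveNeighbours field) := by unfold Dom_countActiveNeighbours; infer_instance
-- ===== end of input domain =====

-- B deletes the center cell (1,1) from the data by slicing row 1, then flattens and counts True
-- unconditionally, instead of A's per-cell skip branch inside nested enumerate loops (objective: alternative).


-- ===== PORT A =====
def countActiveNeighbours (field : List (List Bool)) : Int :=
  (PySem.List.enumerate field).foldl (fun counter rp =>
    (PySem.List.enumerate rp.2).foldl (fun c cp =>
      if rp.1 == 1 && cp.1 == 1 then c
      else if cp.2 == true then c + 1 else c) counter) 0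

-- ===== PORT B =====
def countActiveNeighbours_alt (field : List (List Bool)) : Int :=
  let rows :=
    if field.length > 1 then
      field.set 1 (PySem.List.slice (field.getD 1 []) none (some 1) ++
                   PySem.List.slice (field.getD 1 []) (some 2) none)
    else field
  let flat := rows.flatMap (fun row => row)
  (PySem.List.count flat true : Int)

-- ===== PRECONDITION & SPEC =====
def Spec_countActiveNeighbours (field : List (List Bool)) (out : Int) : Prop := out = countActiveNeighbours_alt field
instance (field : List (List Bool)) (out : Int) : Decidable (Spec_countActiveNeighbours field out) := by unfold Spec_countActiveNeighbours; infer_instance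

-- ===== CLAIM (what is proved, stated in full; the proofs are below) =====
def Claim_equal_countActiveNeighbours : Prop := ∀ (field : List (List Bool)), Dom_countActiveNeighbours field → Spec_countActiveNeighbours field (countActiveNeighbours field)

-- ===== LEMMAS AND PROOFS =====

-- the count of True cells in a row
def pvCnt (row : List Bool) : Int := (row.count true : Int)

-- inner loop of A for a row index ri ≠ 1: no cell is skipped, the loop adds the row's count
theorem pvInner_ne (ri : Int) (h : ri ≠ 1) :
    ∀ (row : List Bool) (s acc : Int),
      (PySem.List.enumerate row s).foldl (fun c cp =>
        if ri == 1 && cp.1 == 1 then c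
        else if cp.2 == true then c + 1 else c) acc = acc + pvCnt row := by
  intro row
  induction row with
  | nil => intro s acc; simp [PySem.List.enumerate_nil, pvCnt]
  | cons a t ih =>
      intro s acc
      rw [PySem.List.enumerate_cons]
      simp only [List.foldl_cons]
      rw [ih (s + 1)]
      have hri : (ri == 1) = false := by simpa using h
      cases a <;> simp [hri, pvCnt, List.count_cons] <;> ring

-- inner loop of A for row index 1, starting at a column index s ≥ 2: nothing is skipped either
theorem pvInner_one_ge2 :
    ∀ (row : List Bool) (s acc : Int), 2 ≤ s →
      (PySem.List.enumerate row s).foldl (fun c cp =>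
        if (1 : Int) == 1 && cp.1 == 1 then c
        else if cp.2 == true then c + 1 else c) acc = acc + pvCnt row := by
  intro row
  induction row with
  | nil => intro s acc _; simp [PySem.List.enumerate_nil, pvCnt]
  | cons a t ih =>
      intro s acc hs
      rw [PySem.List.enumerate_cons]
      simp only [List.foldl_cons]
      rw [ih (s + 1) _ (by omega)]
      have hs1 : (s == 1) = false := by simp; omega
      cases a <;> simp [hs1, pvCnt, List.count_cons] <;> ring

-- outer loop of A over rows whose indices start at s ≥ 2: every row adds its full count
theorem pvOuter_ge2 :
    ∀ (rows : List (List Bool)) (s acc : Int), 2 ≤ s →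
      (PySem.List.enumerate rows s).foldl (fun counter rp =>
        (PySem.List.enumerate rp.2).foldl (fun c cp =>
          if rp.1 == 1 && cp.1 == 1 then c
          else if cp.2 == true then c + 1 else c) counter) acc
      = acc + (rows.map pvCnt).sum := by
  intro rows
  induction rows with
  | nil => intro s acc _; simp [PySem.List.enumerate_nil]
  | cons r t ih =>
      intro s acc hs
      rw [PySem.List.enumerate_cons]
      simp only [List.foldl_cons]
      rw [pvInner_ne s (by omega) r 0 acc, ih (s + 1) _ (by omega)]
      simp [List.map_cons]
      ring

-- inner loop of A for row index 1 starting at column 0: it adds exactly the count of the row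
-- with its element at index 1 deleted
theorem pvInner_one (row : List Bool) (acc : Int) :
    (PySem.List.enumerate row 0).foldl (fun c cp =>
      if (1 : Int) == 1 && cp.1 == 1 then c
      else if cp.2 == true then c + 1 else c) acc
    = acc + pvCnt (row.take 1 ++ row.drop 2) := by
  match row with
  | [] => simp [PySem.List.enumerate_nil, pvCnt]
  | [a] =>
      rw [PySem.List.enumerate_cons, PySem.List.enumerate_nil]
      cases a <;> simp [pvCnt, List.count_cons]
  | a :: b :: t =>
      rw [PySem.List.enumerate_cons, PySem.List.enumerate_cons]
      simp only [List.foldl_cons, zero_add]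
      rw [pvInner_one_ge2 t (1 + 1) _ (by norm_num)]
      cases a <;> cases b <;> simp [pvCnt, List.count_cons, List.count_append] <;> ring

-- count of the flattening is the sum of the row counts
theorem pvCount_flatten (rows : List (List Bool)) :
    ((rows.flatMap (fun row => row)).count true : Int) = (rows.map pvCnt).sum := by
  induction rows with
  | nil => simp
  | cons r t ih =>
      rw [List.flatMap_cons, List.count_append]
      push_cast
      rw [ih]
      simp [pvCnt]

-- ===== VERDICT (by name: the statement is the Claim_ definition above) =====
theorem countActiveNeighbours_spec : Claim_equal_countActiveNeighbours := by
  intro field _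
  unfold Spec_countActiveNeighbours countActiveNeighbours countActiveNeighbours_alt
  match field with
  | [] => simp [PySem.List.enumerate_nil, PySem.List.count]
  | [r0] =>
      rw [PySem.List.enumerate_cons, PySem.List.enumerate_nil]
      simp only [List.foldl_cons, List.foldl_nil]
      rw [pvInner_ne 0 (by norm_num) r0 0 0]
      simp [PySem.List.count, pvCnt]
  | r0 :: r1 :: rest =>
      rw [PySem.List.enumerate_cons, PySem.List.enumerate_cons]
      simp only [List.foldl_cons, zero_add]
      rw [pvInner_ne 0 (by norm_num) r0 0 0, pvInner_one r1, pvOuter_ge2 rest (1 + 1) _ (by norm_num)]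
      have hlen : (r0 :: r1 :: rest).length > 1 := by simp
      simp only [hlen, if_pos, List.getD, List.getElem?_cons_succ, List.getElem?_cons_zero,
        Option.getD_some, List.set, PySem.List.count, decide_true, gt_iff_lt]
      rw [PySem.List.slice_to r1 (by norm_num : (0:Int) ≤ 1),
          PySem.List.slice_from r1 (by norm_num : (0:Int) ≤ 2)]
      have hkey : (((r0 :: (r1.take (Int.toNat 1) ++ r1.drop (Int.toNat 2)) :: rest).flatMap
          (fun row => row)).count true : Int)
          = pvCnt r0 + pvCnt (r1.take 1 ++ r1.drop 2) + (rest.map pvCnt).sum := by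
        rw [List.flatMap_cons, List.flatMap_cons, List.count_append, List.count_append]
        push_cast
        rw [pvCount_flatten]
        simp [pvCnt]
        ring
      rw [hkey]
      ring
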